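-- pv_equiv track=rewrite | github.com/K0DA-PARALLAXStudio/TensorSort_Model_Installer-Comfyui | _Module/modul15_vlm_llm.py | has_standard_clip_keys
-- ===== SOURCE A (Python) =====
-- def has_standard_clip_keys(keys):
--     """Prüft ob Standard CLIP/Text Encoder (Modul 3)"""
--     # CLIP Vision (aber NUR vision, kein language model)
--     if any("vision_model" in k or "visual.transformer" in k for k in keys):
--         has_language = any(k.startswith("model.layers.") for k in keys)
--         if not has_language:
--             return True  # Pure CLIP Vision -> Modul 3
--
--     # CLIP Text / T5
--     if any("text_model.encoder" in k or "encoder.block" in k for k in keys):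
--         return True
--
--     return False
-- ===== SOURCE B (Python) =====
-- def has_standard_clip_keys(keys):
--     """Prüft ob Standard CLIP/Text Encoder (Modul 3)"""
--     has_vision = has_language = has_text = False
--     for k in keys:
--         if "vision_model" in k or "visual.transformer" in k:
--             has_vision = True
--         if k.startswith("model.layers."):
--             has_language = True
--         if "text_model.encoder" in k or "encoder.block" in k:
--             has_text = True
--     return (has_vision and not has_language) or has_text
-- ===== Notes on version B (the rewrite author's own statement) =====
-- stated objective: alternative
-- what changed: Replaces A's three separate short-circuiting any() scans over the key list with a single pass that accumulates has_vision/has_language/has_text flags and combines them once at the end.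
import Mathlib
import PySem

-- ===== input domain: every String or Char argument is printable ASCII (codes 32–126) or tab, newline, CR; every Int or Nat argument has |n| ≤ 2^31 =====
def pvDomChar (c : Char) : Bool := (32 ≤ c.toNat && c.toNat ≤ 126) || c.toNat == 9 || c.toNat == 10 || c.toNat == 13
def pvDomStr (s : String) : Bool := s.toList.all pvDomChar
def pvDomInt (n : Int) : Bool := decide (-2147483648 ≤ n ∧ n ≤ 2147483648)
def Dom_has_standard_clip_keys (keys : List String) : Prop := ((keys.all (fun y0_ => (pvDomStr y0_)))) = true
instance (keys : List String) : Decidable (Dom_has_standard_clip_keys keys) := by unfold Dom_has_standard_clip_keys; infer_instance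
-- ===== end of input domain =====

-- B replaces A's three short-circuiting any() scans with one fold accumulating three flags.
-- ===== PORT A =====
def pvIsVision (k : String) : Bool :=
  PySem.Str.isIn "vision_model" k || PySem.Str.isIn "visual.transformer" k

def pvIsLanguage (k : String) : Bool :=
  PySem.Str.startswith k "model.layers."

def pvIsText (k : String) : Bool :=
  PySem.Str.isIn "text_model.encoder" k || PySem.Str.isIn "encoder.block" k

def has_standard_clip_keys (keys : List String) : Bool :=
  if keys.any pvIsVision then
    if !(keys.any pvIsLanguage) then
      true
    else if keys.any pvIsText then true else false
  else if keys.any pvIsText then true else false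

-- ===== PORT B =====
def pvStep (acc : Bool × Bool × Bool) (k : String) : Bool × Bool × Bool :=
  ( if pvIsVision k then true else acc.1,
    if pvIsLanguage k then true else acc.2.1,
    if pvIsText k then true else acc.2.2 )

def has_standard_clip_keys_alt (keys : List String) : Bool :=
  let flags := keys.foldl pvStep (false, false, false)
  (flags.1 && !flags.2.1) || flags.2.2

-- ===== PRECONDITION & SPEC =====
def Spec_has_standard_clip_keys (keys : List String) (out : Bool) : Prop := out = has_standard_clip_keys_alt keys
instance (keys : List String) (out : Bool) : Decidable (Spec_has_standard_clip_keys keys out) := by unfold Spec_has_standard_clip_keys; infer_instance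

-- ===== CLAIM (what is proved, stated in full; the proofs are below) =====
def Claim_equal_has_standard_clip_keys : Prop := ∀ (keys : List String), Dom_has_standard_clip_keys keys → Spec_has_standard_clip_keys keys (has_standard_clip_keys keys)

-- ===== LEMMAS AND PROOFS =====
theorem pvFold_eq (keys : List String) (s : Bool × Bool × Bool) :
    keys.foldl pvStep s =
      (s.1 || keys.any pvIsVision, s.2.1 || keys.any pvIsLanguage, s.2.2 || keys.any pvIsText) := by
  induction keys generalizing s with
  | nil => simp
  | cons k ks ih =>
    simp only [List.foldl_cons, List.any_cons, ih, pvStep]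
    cases pvIsVision k <;> cases pvIsLanguage k <;> cases pvIsText k <;> simp

-- ===== VERDICT (by name: the statement is the Claim_ definition above) =====
theorem has_standard_clip_keys_spec : Claim_equal_has_standard_clip_keys := by
  intro keys _
  unfold Spec_has_standard_clip_keys has_standard_clip_keys has_standard_clip_keys_alt
  rw [pvFold_eq]
  cases keys.any pvIsVision <;> cases keys.any pvIsLanguage <;> cases keys.any pvIsText <;> simp
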